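-- pv_equiv track=rewrite | github.com/kimjune01/june.kim | worklog/h6_debug.py | compute_reachable_pairs
-- ===== SOURCE A (Python) =====
-- def compute_reachable_pairs(spanner_edges, k):
--     n = 2 * k
--     sorted_edges = sorted(spanner_edges, key=lambda e: e[0])
--     from collections import defaultdict
--     time_groups = defaultdict(list)
--     for (t, ai, bj) in sorted_edges:
--         time_groups[t].append((ai, k + bj))
--     times = sorted(time_groups.keys())
--     reachable = set()
--     for src in range(n):
--         active = {src}
--         for t in times:
--             changed = True
--             while changed:
--                 changed = False
--                 for (u, v) in time_groups[t]:
--                     if u in active and v not in active: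
--                         active.add(v)
--                         changed = True
--                     if v in active and u not in active:
--                         active.add(u)
--                         changed = True
--         for dst in active:
--             if dst != src:
--                 reachable.add((src, dst))
--     return reachable
-- ===== SOURCE B (Python) =====
-- def saturate(g, active):
--     # worklist saturation: keep only unresolved edges between passes; an edge
--     # whose endpoints are both active (or that just fired) is dropped for good
--     pending = g
--     while True:
--         keep, grew = [], False
--         for (u, v) in pending:
--             iu, iv = u in active, v in active
--             if iu and iv:
--                 continue
--             if iu or iv:
--                 active.add(v if iu else u)
--                 grew = True
--             else:
--                 keep.append((u, v))
--         if not grew: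
--             return active
--         pending = keep
--
--
-- def compute_reachable_pairs(spanner_edges, k):
--     n = 2 * k
--     groups = {}
--     for (t, a, b) in spanner_edges:
--         groups.setdefault(t, []).append((a, k + b))
--     # each time group carries the set of its endpoints
--     schedule = [(groups[t], {x for uv in groups[t] for x in uv}) for t in sorted(groups)]
--     # time-major sparse sweep: only sources whose active set has outgrown {src}
--     # are tracked; all other sources implicitly sit at {src} and can only start
--     # growing at a group one of whose endpoints is the source itself
--     grown = {}
--     for (g, ns) in schedule:
--         for (s, a) in grown.items():
--             if not ns.isdisjoint(a):
--                 grown[s] = saturate(g, a)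
--         for x in ns:
--             if 0 <= x < n and x not in grown:
--                 a = saturate(g, {x})
--                 if len(a) > 1:
--                     grown[x] = a
--     out = set()
--     for s in sorted(grown):
--         out.update((s, d) for d in grown[s] if d != s)
--     return out
-- ===== Notes on version B (the rewrite author's own statement) =====
-- stated objective: faster
-- what changed: B replaces A's per-source restarts (for each of the 2k sources, rescan every time group to a changed-flag fixpoint) by a sparse time-major sweep: edges are grouped with one dict pass (no sort of the edge list), each group carries its endpoint set, and a dict tracks only sources whose active set has outgrown {src} — implicit sources can only start growing at a group containing them — while a group is saturated with a shrinking pending worklist that drops resolved edges; the result set is emitted from the tracked sources in increasing order.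
import Mathlib
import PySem

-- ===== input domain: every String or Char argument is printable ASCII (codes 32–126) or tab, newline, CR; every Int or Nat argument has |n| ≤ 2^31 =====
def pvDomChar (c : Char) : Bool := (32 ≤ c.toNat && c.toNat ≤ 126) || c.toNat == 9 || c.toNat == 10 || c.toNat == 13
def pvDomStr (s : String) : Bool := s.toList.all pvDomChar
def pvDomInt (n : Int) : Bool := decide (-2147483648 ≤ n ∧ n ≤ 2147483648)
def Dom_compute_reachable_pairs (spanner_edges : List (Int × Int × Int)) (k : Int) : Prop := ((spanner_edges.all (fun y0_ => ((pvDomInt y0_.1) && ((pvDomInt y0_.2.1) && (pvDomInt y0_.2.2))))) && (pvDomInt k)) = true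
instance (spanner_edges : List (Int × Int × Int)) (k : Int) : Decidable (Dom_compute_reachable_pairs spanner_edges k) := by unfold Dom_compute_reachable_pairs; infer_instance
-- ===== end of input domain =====

-- B tracks only the sources whose active set has outgrown {src} in a dict driven
-- time-major through the groups (all other sources stay implicit), groups edges with
-- one dict pass instead of sorting the edge list, and saturates a group with a
-- shrinking pending worklist instead of A's changed-flag rescans; same returned set,
-- and B's work no longer scales with 2*k on sources no edge ever touches.

-- ===== PORT A =====
-- one edge of the inner 'for (u, v) in time_groups[t]' loop: two sequential ifs on (active, changed)
def pvA_edgeStep (st : PySem.Set Int × Bool) (uv : Int × Int) : PySem.Set Int × Bool :=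
  let st1 := if uv.1 ∈ st.1 ∧ uv.2 ∉ st.1 then (PySem.Set.add st.1 uv.2, true) else st
  if uv.2 ∈ st1.1 ∧ uv.1 ∉ st1.1 then (PySem.Set.add st1.1 uv.1, true) else st1

-- 'while changed:' — fuel only makes the loop total; 2*|g|+1 passes always suffice
def pvA_while (g : List (Int × Int)) : Nat → PySem.Set Int → PySem.Set Int
  | 0, act => act
  | fuel+1, act =>
    let r := g.foldl pvA_edgeStep (act, false)
    if r.2 then pvA_while g fuel r.1 else r.1

def compute_reachable_pairs (spanner_edges : List (Int × Int × Int)) (k : Int) : List (Int × Int) :=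
  let n := 2 * k
  let sorted_edges := PySem.List.sorted spanner_edges (fun e => e.1)
  let time_groups := sorted_edges.foldl
    (fun d e => d.modify e.1 [] (fun l => l ++ [(e.2.1, k + e.2.2)])) PySem.Dict.empty
  let times := PySem.List.sorted time_groups.keys (fun t => t)
  (PySem.List.pyRange 0 n 1).foldl (fun reach src =>
      let act := times.foldl (fun act t =>
        let g := time_groups.getD t []
        pvA_while g (2 * g.length + 1) act) (PySem.Set.ofList [src])
      act.foldl (fun r dst => if dst ≠ src then PySem.Set.add r (src, dst) else r) reach)
    PySem.Set.empty

-- ===== PORT B =====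
-- body of B's pass over the pending worklist, state (active, keep, grew):
-- resolved edge dropped, half-active edge fires (and is dropped), untouched edge kept
def pvB_step (st : PySem.Set Int × List (Int × Int) × Bool) (uv : Int × Int) :
    PySem.Set Int × List (Int × Int) × Bool :=
  if uv.1 ∈ st.1 ∧ uv.2 ∈ st.1 then st
  else if uv.1 ∈ st.1 ∨ uv.2 ∈ st.1 then
    (PySem.Set.add st.1 (if uv.1 ∈ st.1 then uv.2 else uv.1), st.2.1, true)
  else (st.1, st.2.1 ++ [uv], st.2.2)

-- B's 'while True' saturation loop — fuel only makes it total; 2*|g|+1 passes always suffice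
def pvB_sat : Nat → List (Int × Int) → PySem.Set Int → PySem.Set Int
  | 0, _, act => act
  | fuel+1, pending, act =>
    let r := pending.foldl pvB_step (act, [], false)
    if r.2.2 then pvB_sat fuel r.2.1 r.1 else r.1

-- '{x for uv in g for x in uv}'
def pvNodes (g : List (Int × Int)) : PySem.Set Int :=
  g.foldl (fun s uv => PySem.Set.add (PySem.Set.add s uv.1) uv.2) PySem.Set.empty

def compute_reachable_pairs_alt (spanner_edges : List (Int × Int × Int)) (k : Int) : List (Int × Int) :=
  let n := 2 * k
  let groups := spanner_edges.foldl
    (fun d e => d.modify e.1 [] (fun l => l ++ [(e.2.1, k + e.2.2)])) PySem.Dict.empty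
  let schedule := (PySem.List.sorted groups.keys (fun t => t)).map
    (fun t => (groups.getD t [], pvNodes (groups.getD t [])))
  let grown := schedule.foldl (fun gr p =>
      let gr1 := gr.items.foldl (fun d sa =>
          if PySem.Set.isdisjoint p.2 sa.2 = true then d
          else d.insert sa.1 (pvB_sat (2 * p.1.length + 1) p.1 sa.2)) gr
      p.2.foldl (fun d x =>
          if 0 ≤ x ∧ x < n ∧ d.contains x = false then
            let a := pvB_sat (2 * p.1.length + 1) p.1 (PySem.Set.ofList [x])
            if 1 < a.length then d.insert x a else d
          else d) gr1)
    (PySem.Dict.empty : PySem.Dict Int (PySem.Set Int))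
  (PySem.List.sorted grown.keys (fun s => s)).foldl (fun out s =>
      (((grown.getD s []).filter (fun d => d ≠ s)).map (fun d => (s, d))).foldl PySem.Set.add out)
    PySem.Set.empty

-- ===== PRECONDITION & SPEC =====
def Spec_compute_reachable_pairs (spanner_edges : List (Int × Int × Int)) (k : Int) (out : List (Int × Int)) : Prop := out = compute_reachable_pairs_alt spanner_edges k
instance (spanner_edges : List (Int × Int × Int)) (k : Int) (out : List (Int × Int)) : Decidable (Spec_compute_reachable_pairs spanner_edges k out) := by unfold Spec_compute_reachable_pairs; infer_instance

-- ===== CLAIM (what is proved, stated in full; the proofs are below) =====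
def Claim_equal_compute_reachable_pairs : Prop := ∀ (spanner_edges : List (Int × Int × Int)) (k : Int), Dom_compute_reachable_pairs spanner_edges k → Spec_compute_reachable_pairs spanner_edges k (compute_reachable_pairs spanner_edges k)

-- ===== LEMMAS AND PROOFS =====

-- abbreviations used only by the proofs
def pvSat (g : List (Int × Int)) (a : PySem.Set Int) : PySem.Set Int :=
  pvB_sat (2 * g.length + 1) g a

def pvT (gs : List (List (Int × Int))) (s : Int) : PySem.Set Int :=
  gs.foldl (fun a g => pvSat g a) (PySem.Set.ofList [s])

def pvS1 (g : List (Int × Int)) (gr : PySem.Dict Int (PySem.Set Int)) :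
    PySem.Dict Int (PySem.Set Int) :=
  gr.items.foldl (fun d sa =>
    if PySem.Set.isdisjoint (pvNodes g) sa.2 = true then d
    else d.insert sa.1 (pvSat g sa.2)) gr

def pvS2 (n : Int) (g : List (Int × Int)) (d : PySem.Dict Int (PySem.Set Int)) :
    PySem.Dict Int (PySem.Set Int) :=
  (pvNodes g).foldl (fun d x =>
    if 0 ≤ x ∧ x < n ∧ d.contains x = false then
      let a := pvSat g (PySem.Set.ofList [x])
      if 1 < a.length then d.insert x a else d
    else d) d

def pvInv (n : Int) (gs : List (List (Int × Int))) (d : PySem.Dict Int (PySem.Set Int)) : Prop :=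
  d.keys.Nodup ∧ ∀ s : Int,
    d.get? s = if 0 ≤ s ∧ s < n ∧ pvT gs s ≠ PySem.Set.ofList [s] then some (pvT gs s) else none

-- ---------- the two saturation loops compute the same set ----------

inductive pvDrop : List (Int × Int) → List (Int × Int) → PySem.Set Int → Prop
  | nil (act : PySem.Set Int) : pvDrop [] [] act
  | keep (e : Int × Int) (g p : List (Int × Int)) (act : PySem.Set Int) :
      pvDrop g p act → pvDrop (e :: g) (e :: p) act
  | drop (e : Int × Int) (g p : List (Int × Int)) (act : PySem.Set Int) :
      e.1 ∈ act → e.2 ∈ act → pvDrop g p act → pvDrop (e :: g) p act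

theorem pvDrop_refl (g : List (Int × Int)) (act : PySem.Set Int) : pvDrop g g act := by
  induction g with
  | nil => exact pvDrop.nil act
  | cons e g ih => exact pvDrop.keep e g g act ih

theorem pvDrop_mono (g p : List (Int × Int)) (act s : PySem.Set Int)
    (h : pvDrop g p act) : pvDrop g p (act ++ s) := by
  induction h with
  | nil => exact pvDrop.nil _
  | keep e g p act _ ih => exact pvDrop.keep e g p _ ih
  | drop e g p act h1 h2 _ ih =>
    exact pvDrop.drop e g p _ (List.mem_append_left s h1) (List.mem_append_left s h2) ih

theorem pvPass : ∀ (g p : List (Int × Int)) (act : PySem.Set Int),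
    pvDrop g p act → ∀ (c : Bool) (ks : List (Int × Int)),
      (g.foldl pvA_edgeStep (act, c)).1 = (p.foldl pvB_step (act, ks, c)).1
    ∧ (g.foldl pvA_edgeStep (act, c)).2 = (p.foldl pvB_step (act, ks, c)).2.2
    ∧ ∃ s q, (p.foldl pvB_step (act, ks, c)).1 = act ++ s
        ∧ (p.foldl pvB_step (act, ks, c)).2.1 = ks ++ q
        ∧ pvDrop g q ((p.foldl pvB_step (act, ks, c)).1) := by
  intro g
  induction g with
  | nil =>
    intro p act h c ks
    cases h
    exact ⟨rfl, rfl, [], [], by simp, by simp, by simpa using pvDrop.nil act⟩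
  | cons e g ih =>
    intro p act h c ks
    cases h with
    | keep _ _ p' _ hd =>
      by_cases h1 : e.1 ∈ act <;> by_cases h2 : e.2 ∈ act
      · -- both active: no-op in both, edge dropped by B
        have hA : pvA_edgeStep (act, c) e = (act, c) := by
          simp [pvA_edgeStep, h1, h2]
        have hB : pvB_step (act, ks, c) e = (act, ks, c) := by
          simp [pvB_step, h1, h2]
        rw [List.foldl_cons, List.foldl_cons, hA, hB]
        obtain ⟨e1, e2, s, q, hs, hq, hdq⟩ := ih p' act hd c ks
        exact ⟨e1, e2, s, q, hs, hq,
          pvDrop.drop e g q _ (by rw [hs]; exact List.mem_append_left s h1)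
            (by rw [hs]; exact List.mem_append_left s h2) hdq⟩
      · -- e.1 active only: fires, adds e.2
        have hA : pvA_edgeStep (act, c) e = (act ++ [e.2], true) := by
          simp [pvA_edgeStep, h1, h2, PySem.Set.add_of_not_mem]
        have hB : pvB_step (act, ks, c) e = (act ++ [e.2], ks, true) := by
          simp [pvB_step, h1, h2, PySem.Set.add_of_not_mem]
        rw [List.foldl_cons, List.foldl_cons, hA, hB]
        obtain ⟨e1, e2, s, q, hs, hq, hdq⟩ :=
          ih p' (act ++ [e.2]) (pvDrop_mono g p' act [e.2] hd) true ks
        refine ⟨e1, e2, [e.2] ++ s, q, by rw [hs, List.append_assoc], hq, ?_⟩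
        refine pvDrop.drop e g q _ ?_ ?_ hdq
        · rw [hs]; exact List.mem_append_left s (List.mem_append_left [e.2] h1)
        · rw [hs]; exact List.mem_append_left s (List.mem_append_right act (by simp))
      · -- e.2 active only: fires, adds e.1
        have hA : pvA_edgeStep (act, c) e = (act ++ [e.1], true) := by
          simp [pvA_edgeStep, h1, h2, PySem.Set.add_of_not_mem]
        have hB : pvB_step (act, ks, c) e = (act ++ [e.1], ks, true) := by
          simp [pvB_step, h1, h2, PySem.Set.add_of_not_mem]
        rw [List.foldl_cons, List.foldl_cons, hA, hB]
        obtain ⟨e1, e2, s, q, hs, hq, hdq⟩ :=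
          ih p' (act ++ [e.1]) (pvDrop_mono g p' act [e.1] hd) true ks
        refine ⟨e1, e2, [e.1] ++ s, q, by rw [hs, List.append_assoc], hq, ?_⟩
        refine pvDrop.drop e g q _ ?_ ?_ hdq
        · rw [hs]; exact List.mem_append_left s (List.mem_append_right act (by simp))
        · rw [hs]; exact List.mem_append_left s (List.mem_append_left [e.1] h2)
      · -- neither active: no-op in A, kept by B
        have hA : pvA_edgeStep (act, c) e = (act, c) := by
          simp [pvA_edgeStep, h1, h2]
        have hB : pvB_step (act, ks, c) e = (act, ks ++ [e], c) := by
          simp [pvB_step, h1, h2]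
        rw [List.foldl_cons, List.foldl_cons, hA, hB]
        obtain ⟨e1, e2, s, q, hs, hq, hdq⟩ := ih p' act hd c (ks ++ [e])
        exact ⟨e1, e2, s, e :: q, hs, by rw [hq]; simp,
          pvDrop.keep e g q _ hdq⟩
    | drop _ _ _ _ h1 h2 hd =>
      have hA : pvA_edgeStep (act, c) e = (act, c) := by
        simp [pvA_edgeStep, h1, h2]
      rw [List.foldl_cons, hA]
      obtain ⟨e1, e2, s, q, hs, hq, hdq⟩ := ih p act hd c ks
      exact ⟨e1, e2, s, q, hs, hq,
        pvDrop.drop e g q _ (by rw [hs]; exact List.mem_append_left s h1)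
          (by rw [hs]; exact List.mem_append_left s h2) hdq⟩

theorem pvLoop (fuel : Nat) : ∀ (g p : List (Int × Int)) (act : PySem.Set Int),
    pvDrop g p act → pvA_while g fuel act = pvB_sat fuel p act := by
  induction fuel with
  | zero => intro g p act _; rfl
  | succ f ih =>
    intro g p act h
    obtain ⟨e1, e2, s, q, hs, hq, hdq⟩ := pvPass g p act h false []
    show (let r := g.foldl pvA_edgeStep (act, false); if r.2 then pvA_while g f r.1 else r.1)
       = (let r := p.foldl pvB_step (act, [], false); if r.2.2 then pvB_sat f r.2.1 r.1 else r.1)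
    simp only
    rw [e1, e2, hq]
    simp only [List.nil_append]
    by_cases hc : (p.foldl pvB_step (act, [], false)).2.2
    · rw [if_pos hc, if_pos hc]
      exact ih g q _ hdq
    · rw [if_neg hc, if_neg hc]

-- ---------- basic facts about B's saturation ----------

theorem pvB_step_fst_ext (st : PySem.Set Int × List (Int × Int) × Bool) (uv : Int × Int) :
    ∃ r, (pvB_step st uv).1 = st.1 ++ r := by
  unfold pvB_step
  by_cases h1 : uv.1 ∈ st.1 <;> by_cases h2 : uv.2 ∈ st.1
  · exact ⟨[], by simp [h1, h2]⟩
  · exact ⟨[uv.2], by simp [h1, h2, PySem.Set.add_of_not_mem]⟩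
  · exact ⟨[uv.1], by simp [h1, h2, PySem.Set.add_of_not_mem]⟩
  · exact ⟨[], by simp [h1, h2]⟩

theorem pvB_pass_fst_ext : ∀ (p : List (Int × Int)) (st : PySem.Set Int × List (Int × Int) × Bool),
    ∃ r, (p.foldl pvB_step st).1 = st.1 ++ r := by
  intro p
  induction p with
  | nil => exact fun st => ⟨[], by simp⟩
  | cons uv p ih =>
    intro st
    obtain ⟨r1, h1⟩ := pvB_step_fst_ext st uv
    obtain ⟨r2, h2⟩ := ih (pvB_step st uv)
    exact ⟨r1 ++ r2, by rw [List.foldl_cons, h2, h1, List.append_assoc]⟩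

theorem pvB_sat_ext : ∀ (fuel : Nat) (g : List (Int × Int)) (act : PySem.Set Int),
    ∃ r, pvB_sat fuel g act = act ++ r := by
  intro fuel
  induction fuel with
  | zero => exact fun g act => ⟨[], by simp [pvB_sat]⟩
  | succ f ih =>
    intro g act
    obtain ⟨r1, h1⟩ := pvB_pass_fst_ext g (act, [], false)
    show ∃ r, (let rr := g.foldl pvB_step (act, [], false);
        if rr.2.2 then pvB_sat f rr.2.1 rr.1 else rr.1) = act ++ r
    simp only
    by_cases hc : (g.foldl pvB_step (act, [], false)).2.2
    · obtain ⟨r2, h2⟩ := ih (g.foldl pvB_step (act, [], false)).2.1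
        (g.foldl pvB_step (act, [], false)).1
      exact ⟨r1 ++ r2, by rw [if_pos hc, h2, h1, List.append_assoc]⟩
    · exact ⟨r1, by rw [if_neg hc, h1]⟩

theorem pvT_ext_aux : ∀ (gs : List (List (Int × Int))) (a : PySem.Set Int),
    ∃ r, gs.foldl (fun a g => pvSat g a) a = a ++ r := by
  intro gs
  induction gs with
  | nil => exact fun a => ⟨[], by simp⟩
  | cons g gs ih =>
    intro a
    obtain ⟨r1, h1⟩ := pvB_sat_ext (2 * g.length + 1) g a
    obtain ⟨r2, h2⟩ := ih (pvSat g a)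
    refine ⟨r1 ++ r2, ?_⟩
    rw [List.foldl_cons, h2]
    show pvSat g a ++ r2 = a ++ (r1 ++ r2)
    rw [pvSat, h1, List.append_assoc]

theorem pvT_ext (gs : List (List (Int × Int))) (s : Int) :
    ∃ r, pvT gs s = PySem.Set.ofList [s] ++ r := pvT_ext_aux gs _

theorem pv_ne_single_iff (a r : PySem.Set Int) (s : Int) (h : a = PySem.Set.ofList [s] ++ r) :
    (a ≠ PySem.Set.ofList [s]) ↔ 1 < a.length := by
  subst h
  cases r <;> simp [PySem.Set.ofList]

theorem pvB_pass_idle : ∀ (p : List (Int × Int)) (act : PySem.Set Int) (ks : List (Int × Int)),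
    (∀ uv ∈ p, uv.1 ∉ act ∧ uv.2 ∉ act) →
    p.foldl pvB_step (act, ks, false) = (act, ks ++ p, false) := by
  intro p
  induction p with
  | nil => intro act ks _; simp
  | cons uv p ih =>
    intro act ks h
    obtain ⟨h1, h2⟩ := h uv (by simp)
    have hstep : pvB_step (act, ks, false) uv = (act, ks ++ [uv], false) := by
      simp [pvB_step, h1, h2]
    rw [List.foldl_cons, hstep, ih act (ks ++ [uv]) (fun e he => h e (by simp [he]))]
    simp

theorem pvB_sat_idle (fuel : Nat) (g : List (Int × Int)) (act : PySem.Set Int)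
    (h : ∀ uv ∈ g, uv.1 ∉ act ∧ uv.2 ∉ act) : pvB_sat fuel g act = act := by
  cases fuel with
  | zero => rfl
  | succ f =>
    show (let r := g.foldl pvB_step (act, [], false); if r.2.2 then pvB_sat f r.2.1 r.1 else r.1) = act
    rw [pvB_pass_idle g act [] h]
    simp

theorem mem_pvNodes_aux : ∀ (g : List (Int × Int)) (s0 : PySem.Set Int) (x : Int),
    x ∈ g.foldl (fun s uv => PySem.Set.add (PySem.Set.add s uv.1) uv.2) s0
      ↔ x ∈ s0 ∨ ∃ uv ∈ g, x = uv.1 ∨ x = uv.2 := by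
  intro g
  induction g with
  | nil => simp
  | cons uv g ih =>
    intro s0 x
    rw [List.foldl_cons, ih]
    simp only [PySem.Set.mem_add, List.mem_cons]
    constructor
    · rintro (((h | h) | h) | ⟨e, he, hx⟩)
      · exact Or.inl h
      · exact Or.inr ⟨uv, Or.inl rfl, Or.inl h⟩
      · exact Or.inr ⟨uv, Or.inl rfl, Or.inr h⟩
      · exact Or.inr ⟨e, Or.inr he, hx⟩
    · rintro (h | ⟨e, (rfl | he), hx⟩)
      · exact Or.inl (Or.inl (Or.inl h))
      · rcases hx with h | h
        · exact Or.inl (Or.inl (Or.inr h))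
        · exact Or.inl (Or.inr h)
      · exact Or.inr ⟨e, he, hx⟩

theorem mem_pvNodes (g : List (Int × Int)) (x : Int) :
    x ∈ pvNodes g ↔ ∃ uv ∈ g, x = uv.1 ∨ x = uv.2 := by
  rw [pvNodes, mem_pvNodes_aux]
  simp [PySem.Set.empty]

theorem nodup_pvNodes_aux : ∀ (g : List (Int × Int)) (s0 : PySem.Set Int), s0.Nodup →
    (g.foldl (fun s uv => PySem.Set.add (PySem.Set.add s uv.1) uv.2) s0).Nodup := by
  intro g
  induction g with
  | nil => exact fun s0 h => h
  | cons uv g ih =>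
    intro s0 h
    exact ih _ (PySem.Set.nodup_add _ _ (PySem.Set.nodup_add _ _ h))

theorem nodup_pvNodes (g : List (Int × Int)) : (pvNodes g).Nodup :=
  nodup_pvNodes_aux g PySem.Set.empty (by simp [PySem.Set.empty])

theorem pvSat_idle_of_disjoint (g : List (Int × Int)) (act : PySem.Set Int)
    (h : PySem.Set.isdisjoint (pvNodes g) act = true) : pvSat g act = act := by
  apply pvB_sat_idle
  intro uv huv
  have hd := (PySem.Set.isdisjoint_iff _ _).mp h
  exact ⟨hd uv.1 ((mem_pvNodes g uv.1).mpr ⟨uv, huv, Or.inl rfl⟩),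
         hd uv.2 ((mem_pvNodes g uv.2).mpr ⟨uv, huv, Or.inr rfl⟩)⟩

theorem pvSat_idle_of_not_node (g : List (Int × Int)) (s : Int) (h : s ∉ pvNodes g) :
    pvSat g (PySem.Set.ofList [s]) = PySem.Set.ofList [s] := by
  apply pvB_sat_idle
  intro uv huv
  constructor
  · intro hc
    have : uv.1 = s := by simpa [PySem.Set.ofList] using hc
    exact h ((mem_pvNodes g s).mpr ⟨uv, huv, Or.inl this.symm⟩)
  · intro hc
    have : uv.2 = s := by simpa [PySem.Set.ofList] using hc
    exact h ((mem_pvNodes g s).mpr ⟨uv, huv, Or.inr this.symm⟩)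

-- ---------- dict lookup through B's two per-group loops ----------

theorem pv_get?_eq_find? (l : List (Int × PySem.Set Int)) (s : Int) :
    (PySem.Dict.mk l).get? s = (l.find? (fun sa => sa.1 == s)).map Prod.snd := by
  induction l with
  | nil => rfl
  | cons sa l ih =>
    rcases sa with ⟨a, v⟩
    rw [show ((a, v) :: l : List (Int × PySem.Set Int)) = (a, v) :: l from rfl]
    rw [PySem.Dict.get?_mk_cons]
    by_cases h : a = s
    · simp [h]
    · simp only [List.find?_cons]
      have : ((a, v).1 == s) = false := by simpa using h
      simp [this, h, ih]

theorem pvS1_fold_skip (g : List (Int × Int)) :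
    ∀ (l : List (Int × PySem.Set Int)) (d0 : PySem.Dict Int (PySem.Set Int)) (s : Int),
    s ∉ l.map Prod.fst →
    (l.foldl (fun d sa => if PySem.Set.isdisjoint (pvNodes g) sa.2 = true then d
        else d.insert sa.1 (pvSat g sa.2)) d0).get? s = d0.get? s := by
  intro l
  induction l with
  | nil => intro d0 s _; rfl
  | cons sa l ih =>
    intro d0 s hs
    rw [List.map_cons] at hs
    have h1 : s ≠ sa.1 := fun h => hs (h ▸ List.mem_cons_self)
    have h2 : s ∉ l.map Prod.fst := fun h => hs (List.mem_cons_of_mem _ h)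
    rw [List.foldl_cons]
    rw [ih _ s h2]
    by_cases hd : PySem.Set.isdisjoint (pvNodes g) sa.2 = true
    · rw [if_pos hd]
    · rw [if_neg hd, PySem.Dict.get?_insert, if_neg h1]

theorem pvS1_fold_get? (g : List (Int × Int)) :
    ∀ (l : List (Int × PySem.Set Int)) (d0 : PySem.Dict Int (PySem.Set Int)) (s : Int),
    (l.map Prod.fst).Nodup →
    (l.foldl (fun d sa => if PySem.Set.isdisjoint (pvNodes g) sa.2 = true then d
        else d.insert sa.1 (pvSat g sa.2)) d0).get? s
      = match l.find? (fun sa => sa.1 == s) with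
        | some sa => if PySem.Set.isdisjoint (pvNodes g) sa.2 = true then d0.get? s
                     else some (pvSat g sa.2)
        | none => d0.get? s := by
  intro l
  induction l with
  | nil => intro d0 s _; rfl
  | cons sa l ih =>
    intro d0 s hnd
    rw [List.map_cons, List.nodup_cons] at hnd
    rw [List.foldl_cons]
    by_cases h : sa.1 = s
    · have hfind : ((sa :: l).find? (fun sa => sa.1 == s)) = some sa := by
        simp [List.find?_cons, h]
      rw [hfind]
      have hskip := pvS1_fold_skip g l
        (if PySem.Set.isdisjoint (pvNodes g) sa.2 = true then d0
         else d0.insert sa.1 (pvSat g sa.2)) s (h ▸ hnd.1)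
      rw [hskip]
      show (if PySem.Set.isdisjoint (pvNodes g) sa.2 = true then d0
            else d0.insert sa.1 (pvSat g sa.2)).get? s
        = if PySem.Set.isdisjoint (pvNodes g) sa.2 = true then d0.get? s
          else some (pvSat g sa.2)
      by_cases hd : PySem.Set.isdisjoint (pvNodes g) sa.2 = true
      · rw [if_pos hd, if_pos hd]
      · rw [if_neg hd, if_neg hd, PySem.Dict.get?_insert, if_pos h.symm]
    · have hb : (sa.1 == s) = false := by simpa using h
      have hfind : ((sa :: l).find? (fun sa => sa.1 == s)) = l.find? (fun sa => sa.1 == s) := by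
        simp [List.find?_cons, hb]
      rw [hfind, ih _ s hnd.2]
      have : (if PySem.Set.isdisjoint (pvNodes g) sa.2 = true then d0
              else d0.insert sa.1 (pvSat g sa.2)).get? s = d0.get? s := by
        by_cases hd : PySem.Set.isdisjoint (pvNodes g) sa.2 = true
        · rw [if_pos hd]
        · rw [if_neg hd, PySem.Dict.get?_insert, if_neg (fun hh => h hh.symm)]
      rw [this]

theorem pvS1_get? (g : List (Int × Int)) (d : PySem.Dict Int (PySem.Set Int))
    (hnd : d.keys.Nodup) (s : Int) :
    (pvS1 g d).get? s
      = (d.get? s).map (fun a => if PySem.Set.isdisjoint (pvNodes g) a = true then a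
                                 else pvSat g a) := by
  have hitems : d.get? s = (d.items.find? (fun sa => sa.1 == s)).map Prod.snd := by
    have := pv_get?_eq_find? d.items s
    rwa [show PySem.Dict.mk d.items = d from rfl] at this
  rw [pvS1, pvS1_fold_get? g d.items d s hnd]
  cases hf : d.items.find? (fun sa => sa.1 == s) with
  | none =>
    have hval : d.get? s = none := by rw [hitems, hf]; rfl
    rw [hval]
    rfl
  | some sa =>
    have hval : d.get? s = some sa.2 := by rw [hitems, hf]; rfl
    rw [hval]
    show (if PySem.Set.isdisjoint (pvNodes g) sa.2 = true then some sa.2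
          else some (pvSat g sa.2))
      = some (if PySem.Set.isdisjoint (pvNodes g) sa.2 = true then sa.2 else pvSat g sa.2)
    by_cases hd : PySem.Set.isdisjoint (pvNodes g) sa.2 = true
    · rw [if_pos hd, if_pos hd]
    · rw [if_neg hd, if_neg hd]

theorem pvS1_keys_aux (g : List (Int × Int)) :
    ∀ (l : List (Int × PySem.Set Int)) (d0 : PySem.Dict Int (PySem.Set Int)),
    (∀ sa ∈ l, sa.1 ∈ d0.keys) →
    (l.foldl (fun d sa => if PySem.Set.isdisjoint (pvNodes g) sa.2 = true then d
        else d.insert sa.1 (pvSat g sa.2)) d0).keys = d0.keys := by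
  intro l
  induction l with
  | nil => intro d0 _; rfl
  | cons sa l ih =>
    intro d0 h
    rw [List.foldl_cons]
    by_cases hd : PySem.Set.isdisjoint (pvNodes g) sa.2 = true
    · rw [if_pos hd]; exact ih d0 (fun e he => h e (by simp [he]))
    · rw [if_neg hd]
      have hk : (d0.insert sa.1 (pvSat g sa.2)).keys = d0.keys :=
        PySem.Dict.keys_insert_of_contains d0 _
          ((PySem.Dict.contains_iff_mem_keys d0 sa.1).mpr (h sa (by simp)))
      rw [ih _ (fun e he => by rw [hk]; exact h e (by simp [he])), hk]

theorem pvS1_keys (g : List (Int × Int)) (d : PySem.Dict Int (PySem.Set Int)) :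
    (pvS1 g d).keys = d.keys := by
  apply pvS1_keys_aux
  intro sa h
  exact List.mem_map_of_mem h

theorem pvS2_fold_skip (n : Int) (g : List (Int × Int)) :
    ∀ (l : List Int) (d0 : PySem.Dict Int (PySem.Set Int)) (s : Int), s ∉ l →
    (l.foldl (fun d x => if 0 ≤ x ∧ x < n ∧ d.contains x = false then
        (let a := pvSat g (PySem.Set.ofList [x]); if 1 < a.length then d.insert x a else d)
      else d) d0).get? s = d0.get? s := by
  intro l
  induction l with
  | nil => intro d0 s _; rfl
  | cons x l ih =>
    intro d0 s hs
    rw [List.foldl_cons, ih _ s (fun h => hs (by simp [h]))]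
    by_cases hc : 0 ≤ x ∧ x < n ∧ d0.contains x = false
    · rw [if_pos hc]
      simp only
      by_cases hl : 1 < (pvSat g (PySem.Set.ofList [x])).length
      · rw [if_pos hl, PySem.Dict.get?_insert, if_neg (fun h => hs (by simp [h]))]
      · rw [if_neg hl]
    · rw [if_neg hc]

theorem pvS2_fold_get? (n : Int) (g : List (Int × Int)) :
    ∀ (l : List Int), l.Nodup → ∀ (d0 : PySem.Dict Int (PySem.Set Int)) (s : Int),
    (l.foldl (fun d x => if 0 ≤ x ∧ x < n ∧ d.contains x = false then
        (let a := pvSat g (PySem.Set.ofList [x]); if 1 < a.length then d.insert x a else d)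
      else d) d0).get? s
      = if s ∈ l ∧ 0 ≤ s ∧ s < n ∧ d0.get? s = none ∧ 1 < (pvSat g (PySem.Set.ofList [s])).length
        then some (pvSat g (PySem.Set.ofList [s])) else d0.get? s := by
  intro l
  induction l with
  | nil => intro _ d0 s; simp
  | cons x l ih =>
    intro hnd d0 s
    rw [List.nodup_cons] at hnd
    rw [List.foldl_cons]
    by_cases hxs : x = s
    · subst hxs
      rw [pvS2_fold_skip n g l _ x hnd.1]
      by_cases hr : 0 ≤ x ∧ x < n
      · by_cases h0 : d0.get? x = none
        · have hcon : d0.contains x = false := (PySem.Dict.get?_eq_none_iff_contains d0 x).mp h0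
          rw [if_pos ⟨hr.1, hr.2, hcon⟩]
          simp only
          by_cases hl : 1 < (pvSat g (PySem.Set.ofList [x])).length
          · rw [if_pos hl, PySem.Dict.get?_insert, if_pos rfl,
              if_pos ⟨by simp, hr.1, hr.2, h0, hl⟩]
          · rw [if_neg hl, if_neg (by tauto), h0]
        · have hcon : ¬ d0.contains x = false := by
            rw [← PySem.Dict.get?_eq_none_iff_contains]; exact h0
          rw [if_neg (by tauto), if_neg (by tauto)]
      · rw [if_neg (by tauto), if_neg (by tauto)]
    · have hstep : (if 0 ≤ x ∧ x < n ∧ d0.contains x = false then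
          (let a := pvSat g (PySem.Set.ofList [x]);
           if 1 < a.length then d0.insert x a else d0) else d0).get? s = d0.get? s := by
        by_cases hc : 0 ≤ x ∧ x < n ∧ d0.contains x = false
        · rw [if_pos hc]
          simp only
          by_cases hl : 1 < (pvSat g (PySem.Set.ofList [x])).length
          · rw [if_pos hl, PySem.Dict.get?_insert, if_neg (by intro h; exact hxs h.symm)]
          · rw [if_neg hl]
        · rw [if_neg hc]
      have hget := ih hnd.2 (if 0 ≤ x ∧ x < n ∧ d0.contains x = false then
          (let a := pvSat g (PySem.Set.ofList [x]);
           if 1 < a.length then d0.insert x a else d0) else d0) s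
      rw [hget, hstep]
      have hmem : (s ∈ x :: l) ↔ (s ∈ l) := by
        rw [List.mem_cons]
        constructor
        · rintro (h | h)
          · exact absurd h.symm hxs
          · exact h
        · exact Or.inr
      by_cases hin : s ∈ l
      · by_cases hrest : 0 ≤ s ∧ s < n ∧ d0.get? s = none ∧
            1 < (pvSat g (PySem.Set.ofList [s])).length
        · rw [if_pos ⟨hin, hrest⟩, if_pos ⟨hmem.mpr hin, hrest⟩]
        · rw [if_neg (by tauto), if_neg (by tauto)]
      · rw [if_neg (by tauto), if_neg (by intro hc; exact hin (hmem.mp hc.1))]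

theorem pvS2_nodup (n : Int) (g : List (Int × Int)) :
    ∀ (l : List Int) (d0 : PySem.Dict Int (PySem.Set Int)), d0.keys.Nodup →
    ((l.foldl (fun d x => if 0 ≤ x ∧ x < n ∧ d.contains x = false then
        (let a := pvSat g (PySem.Set.ofList [x]); if 1 < a.length then d.insert x a else d)
      else d) d0)).keys.Nodup := by
  intro l
  induction l with
  | nil => exact fun d0 h => h
  | cons x l ih =>
    intro d0 h
    rw [List.foldl_cons]
    apply ih
    by_cases hc : 0 ≤ x ∧ x < n ∧ d0.contains x = false
    · rw [if_pos hc]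
      simp only
      by_cases hl : 1 < (pvSat g (PySem.Set.ofList [x])).length
      · rw [if_pos hl]; exact PySem.Dict.nodup_keys_insert d0 x _ h
      · rw [if_neg hl]; exact h
    · rw [if_neg hc]; exact h

-- ---------- the invariant: the dict holds exactly the outgrown sources ----------

theorem pvT_append (gs : List (List (Int × Int))) (g : List (Int × Int)) (s : Int) :
    pvT (gs ++ [g]) s = pvSat g (pvT gs s) := by
  rw [pvT, pvT, List.foldl_append]
  rfl

theorem pvStep_inv (n : Int) (g : List (Int × Int)) (gs : List (List (Int × Int)))
    (d : PySem.Dict Int (PySem.Set Int)) (h : pvInv n gs d) :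
    pvInv n (gs ++ [g]) (pvS2 n g (pvS1 g d)) := by
  obtain ⟨hnd, hget⟩ := h
  have hnd1 : (pvS1 g d).keys.Nodup := by rw [pvS1_keys]; exact hnd
  constructor
  · exact pvS2_nodup n g (pvNodes g) (pvS1 g d) hnd1
  · intro s
    rw [pvS2, pvS2_fold_get? n g (pvNodes g) (nodup_pvNodes g) (pvS1 g d) s,
        pvS1_get? g d hnd s, hget s, pvT_append]
    by_cases hr : 0 ≤ s ∧ s < n
    · by_cases hT : pvT gs s ≠ PySem.Set.ofList [s]
      · -- tracked source: first loop advances it, second loop skips it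
        have hC : 0 ≤ s ∧ s < n ∧ pvT gs s ≠ PySem.Set.ofList [s] := ⟨hr.1, hr.2, hT⟩
        rw [if_pos hC]
        obtain ⟨r, hrT⟩ := pvT_ext gs s
        have hTval : (if PySem.Set.isdisjoint (pvNodes g) (pvT gs s) = true then pvT gs s
            else pvSat g (pvT gs s)) = pvSat g (pvT gs s) := by
          by_cases hd2 : PySem.Set.isdisjoint (pvNodes g) (pvT gs s) = true
          · rw [if_pos hd2, pvSat_idle_of_disjoint g _ hd2]
          · rw [if_neg hd2]
        have hne' : pvSat g (pvT gs s) ≠ PySem.Set.ofList [s] := by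
          obtain ⟨r2, hr2⟩ := pvB_sat_ext (2 * g.length + 1) g (pvT gs s)
          have hsat : pvSat g (pvT gs s) = PySem.Set.ofList [s] ++ (r ++ r2) := by
            rw [pvSat, hr2, hrT, List.append_assoc]
          intro hc
          apply hT
          have hnil : r ++ r2 = [] := by
            have := hsat.symm.trans hc
            rcases r with _ | ⟨y, r⟩
            · simp at this ⊢
              simpa [PySem.Set.ofList] using this
            · exfalso
              have hlen := congrArg List.length this
              simp [PySem.Set.ofList] at hlen
          have hrnil : r = [] := by rcases List.append_eq_nil_iff.mp hnil with ⟨h1, _⟩; exact h1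
          rw [hrT, hrnil, List.append_nil]
        simp only [Option.map_some]
        rw [hTval]
        have hno : ¬ (s ∈ pvNodes g ∧ 0 ≤ s ∧ s < n
            ∧ (some (pvSat g (pvT gs s)) : Option (PySem.Set Int)) = none
            ∧ 1 < (pvSat g (PySem.Set.ofList [s])).length) := by
          rintro ⟨_, _, _, hx, _⟩
          exact Option.some_ne_none _ hx
        have hC' : 0 ≤ s ∧ s < n ∧ pvSat g (pvT gs s) ≠ PySem.Set.ofList [s] :=
          ⟨hr.1, hr.2, hne'⟩
        rw [if_neg hno, if_pos hC']
      · -- source still at {s}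
        push_neg at hT
        have hCn : ¬ (0 ≤ s ∧ s < n ∧ pvT gs s ≠ PySem.Set.ofList [s]) := by
          rintro ⟨_, _, hx⟩; exact hx hT
        rw [if_neg hCn]
        simp only [Option.map_none]
        rw [hT]
        by_cases hmem : s ∈ pvNodes g
        · obtain ⟨r, hrX⟩ := pvB_sat_ext (2 * g.length + 1) g (PySem.Set.ofList [s])
          have hiff := pv_ne_single_iff (pvSat g (PySem.Set.ofList [s])) r s hrX
          by_cases hl : 1 < (pvSat g (PySem.Set.ofList [s])).length
          · have hP : s ∈ pvNodes g ∧ 0 ≤ s ∧ s < n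
                ∧ True
                ∧ 1 < (pvSat g (PySem.Set.ofList [s])).length := ⟨hmem, hr.1, hr.2, trivial, hl⟩
            have hQ : 0 ≤ s ∧ s < n ∧ pvSat g (PySem.Set.ofList [s]) ≠ PySem.Set.ofList [s] :=
              ⟨hr.1, hr.2, hiff.mpr hl⟩
            rw [if_pos hP, if_pos hQ]
          · have hPn : ¬ (s ∈ pvNodes g ∧ 0 ≤ s ∧ s < n
                ∧ True
                ∧ 1 < (pvSat g (PySem.Set.ofList [s])).length) := by
              rintro ⟨_, _, _, _, hx⟩; exact hl hx
            have hQn : ¬ (0 ≤ s ∧ s < n ∧ pvSat g (PySem.Set.ofList [s]) ≠ PySem.Set.ofList [s]) := by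
              rintro ⟨_, _, hx⟩; exact hl (hiff.mp hx)
            rw [if_neg hPn, if_neg hQn]
        · rw [pvSat_idle_of_not_node g s hmem]
          have hPn : ¬ (s ∈ pvNodes g ∧ 0 ≤ s ∧ s < n
              ∧ True
              ∧ 1 < (PySem.Set.ofList [s] : PySem.Set Int).length) := by
            rintro ⟨hx, _⟩; exact hmem hx
          have hQn : ¬ (0 ≤ s ∧ s < n ∧ PySem.Set.ofList [s] ≠ PySem.Set.ofList [s]) := by
            rintro ⟨_, _, hx⟩; exact hx rfl
          rw [if_neg hPn, if_neg hQn]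
    · have hCn : ¬ (0 ≤ s ∧ s < n ∧ pvT gs s ≠ PySem.Set.ofList [s]) := by tauto
      rw [if_neg hCn]
      simp only [Option.map_none]
      have hPn : ¬ (s ∈ pvNodes g ∧ 0 ≤ s ∧ s < n
          ∧ True
          ∧ 1 < (pvSat g (PySem.Set.ofList [s])).length) := by tauto
      have hQn : ¬ (0 ≤ s ∧ s < n ∧ pvSat g (pvT gs s) ≠ PySem.Set.ofList [s]) := by tauto
      rw [if_neg hPn, if_neg hQn]

theorem pvInv_nil (n : Int) : pvInv n [] PySem.Dict.empty := by
  refine ⟨PySem.Dict.nodup_keys_empty, fun s => ?_⟩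
  rw [PySem.Dict.get?_empty, if_neg (by intro h; exact h.2.2 rfl)]

theorem pvInv_fold (n : Int) : ∀ (gsl pref : List (List (Int × Int)))
    (d : PySem.Dict Int (PySem.Set Int)), pvInv n pref d →
    pvInv n (pref ++ gsl) (gsl.foldl (fun d g => pvS2 n g (pvS1 g d)) d) := by
  intro gsl
  induction gsl with
  | nil => intro pref d h; simpa using h
  | cons g gsl ih =>
    intro pref d h
    rw [List.foldl_cons]
    have := ih (pref ++ [g]) (pvS2 n g (pvS1 g d)) (pvStep_inv n g pref d h)
    rwa [List.append_assoc] at this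
    
-- ---------- emission ----------

theorem pv_foldl_skip {α β : Type} (p : β → Bool) (f : α → β → α) :
    ∀ (l : List β) (i : α), (∀ x ∈ l, p x = false → ∀ acc, f acc x = acc) →
    l.foldl f i = (l.filter p).foldl f i := by
  intro l
  induction l with
  | nil => intro i _; rfl
  | cons x l ih =>
    intro i h
    rw [List.foldl_cons, List.filter_cons]
    cases hp : p x with
    | true => rw [if_pos rfl]; exact ih (f i x) (fun y hy => h y (by simp [hy]))
    | false =>
      rw [h x (by simp) hp i]
      simp only [Bool.false_eq_true, if_false]
      exact ih i (fun y hy => h y (by simp [hy]))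

theorem pv_emit_eq (act : List Int) (src : Int) (r : PySem.Set (Int × Int)) :
    act.foldl (fun r dst => if dst ≠ src then PySem.Set.add r (src, dst) else r) r
      = ((act.filter (fun d => d ≠ src)).map (fun d => (src, d))).foldl PySem.Set.add r := by
  induction act generalizing r with
  | nil => rfl
  | cons d act ih =>
    by_cases h : d = src
    · subst h
      simpa using ih r
    · have hf : List.filter (fun x => decide (x ≠ src)) (d :: act)
          = d :: List.filter (fun x => decide (x ≠ src)) act := by simp [h]
      rw [hf, List.map_cons]
      simp only [List.foldl_cons]
      rw [if_pos h, ih]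

theorem pv_foldl_ext {α β : Type} (f g : α → β → α) (l : List β) (i : α)
    (h : ∀ acc b, f acc b = g acc b) : l.foldl f i = l.foldl g i := by
  induction l generalizing i with
  | nil => rfl
  | cons b l ih => rw [List.foldl_cons, List.foldl_cons, h, ih]

-- ---------- grouping: dict built from the sorted edge list = dict from the raw list ----------

theorem pv_filter_insertBy_neg {α : Type} (p : α → Bool) (before : α → α → Bool) (x : α)
    (l : List α) (hx : p x = false) :
    (PySem.List.insertBy before x l).filter p = l.filter p := by
  induction l with
  | nil => simp [PySem.List.insertBy, hx]
  | cons y ys ih =>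
    by_cases h : before x y = true
    · simp [PySem.List.insertBy, h, hx]
    · simp only [PySem.List.insertBy, h, List.filter_cons]
      cases hy : p y <;> simp [hy, ih]

theorem pv_filter_insertBy_pos (x : Int × Int × Int) (l : List (Int × Int × Int)) (t : Int)
    (hx : x.1 = t) (hl : l.Pairwise (fun a b => a.1 ≤ b.1)) :
    (PySem.List.insertBy (fun a b => decide (a.1 < b.1)) x l).filter (fun e => e.1 == t)
      = l.filter (fun e => e.1 == t) ++ [x] := by
  induction l with
  | nil => simp [PySem.List.insertBy, hx]
  | cons y ys ih =>
    rcases List.pairwise_cons.mp hl with ⟨hy, htl⟩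
    by_cases h : x.1 < y.1
    · have hnil : (y :: ys).filter (fun e => e.1 == t) = [] := by
        apply List.filter_eq_nil_iff.mpr
        intro z hz
        have : y.1 ≤ z.1 := by
          rcases hz with _ | hz
          · exact le_refl _
          · exact hy z (by assumption)
        simp only [beq_iff_eq]
        omega
      simp only [PySem.List.insertBy, decide_eq_true_eq, h, if_true] at *
      rw [List.filter_cons_of_pos (by simp [hx]), hnil]
      simp
    · simp only [PySem.List.insertBy, decide_eq_true_eq, h, if_false]
      rw [List.filter_cons, List.filter_cons]
      cases hy2 : (y.1 == t) <;> simp [ih htl]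

theorem pv_sorted_append_singleton (xs : List (Int × Int × Int)) (x : Int × Int × Int) :
    PySem.List.sorted (xs ++ [x]) (fun e => e.1)
      = PySem.List.insertBy (fun a b => decide (a.1 < b.1)) x
          (PySem.List.sorted xs (fun e => e.1)) := by
  rw [PySem.List.sorted_eq_foldl_insertBy, PySem.List.sorted_eq_foldl_insertBy,
      List.foldl_append]
  rfl

theorem pv_sorted_filter_key (xs : List (Int × Int × Int)) (t : Int) :
    (PySem.List.sorted xs (fun e => e.1)).filter (fun e => e.1 == t)
      = xs.filter (fun e => e.1 == t) := by
  induction xs using List.reverseRecOn with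
  | nil => rfl
  | append_singleton xs x ih =>
    rw [pv_sorted_append_singleton, List.filter_append]
    by_cases hx : x.1 = t
    · rw [pv_filter_insertBy_pos x _ t hx (PySem.List.sorted_pairwise xs (fun e => e.1)), ih]
      simp [hx]
    · rw [pv_filter_insertBy_neg _ _ _ _ (by simp [hx]), ih]
      simp [hx]

theorem pv_groups_getD (l : List (Int × Int × Int)) (k t : Int) :
    (l.foldl (fun d e => d.modify e.1 [] (fun g => g ++ [(e.2.1, k + e.2.2)]))
        PySem.Dict.empty).getD t []
      = (l.filter (fun e => e.1 == t)).map (fun e => (e.2.1, k + e.2.2)) := by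
  have hmap := @List.foldl_map (Int × Int × Int) (Int × (Int × Int)) (PySem.Dict Int (List (Int × Int)))
      (fun e => (e.1, (e.2.1, k + e.2.2)))
      (fun d p => d.modify p.1 [] (fun g => g ++ [p.2]))
      l PySem.Dict.empty
  rw [show (l.foldl (fun d e => d.modify e.1 [] (fun g => g ++ [(e.2.1, k + e.2.2)]))
        PySem.Dict.empty)
      = ((l.map (fun e => (e.1, (e.2.1, k + e.2.2)))).foldl
          (fun d p => d.modify p.1 [] (fun g => g ++ [p.2])) PySem.Dict.empty) from hmap.symm]
  rw [PySem.Dict.getD_foldl_modify_append]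
  rw [List.filter_map]
  simp [Function.comp_def, List.map_map]

theorem pv_groups_keys (l : List (Int × Int × Int)) (k : Int) :
    (l.foldl (fun d e => d.modify e.1 [] (fun g => g ++ [(e.2.1, k + e.2.2)]))
        PySem.Dict.empty).keys = PySem.Set.ofList (l.map (fun e => e.1)) := by
  have h := PySem.Dict.keys_foldl_modify_key l (fun e => e.1) ([] : List (Int × Int))
      (fun _ e => fun g => g ++ [(e.2.1, k + e.2.2)]) PySem.Dict.empty
  simpa [PySem.Set.update_nil_left] using h

theorem pv_times_eq (xs : List (Int × Int × Int)) :
    PySem.List.sorted (PySem.Set.ofList ((PySem.List.sorted xs (fun e => e.1)).map (fun e => e.1))) (fun t => t)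
      = PySem.List.sorted (PySem.Set.ofList (xs.map (fun e => e.1))) (fun t => t) := by
  apply PySem.List.sorted_eq_sorted_of_perm _ _ _ (fun a b h => h)
  apply (List.perm_ext_iff_of_nodup (PySem.Set.nodup_ofList _) (PySem.Set.nodup_ofList _)).mpr
  intro a
  have hperm : (PySem.List.sorted xs (fun e => e.1)).Perm xs := PySem.List.sorted_perm xs (fun e => e.1) false
  simp [PySem.Set.mem_ofList, (hperm.map (fun e => e.1)).mem_iff]

theorem pv_bridge (nn : Int) (gsl : List (List (Int × Int))) :
    (PySem.List.pyRange 0 nn 1).foldl (fun reach src =>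
        (pvT gsl src).foldl (fun r dst => if dst ≠ src then PySem.Set.add r (src, dst) else r) reach)
      PySem.Set.empty
    = (PySem.List.sorted (gsl.foldl (fun d g => pvS2 nn g (pvS1 g d)) PySem.Dict.empty).keys
        (fun s => s)).foldl
        (fun out s =>
          ((((gsl.foldl (fun d g => pvS2 nn g (pvS1 g d)) PySem.Dict.empty).getD s []).filter
            (fun d => d ≠ s)).map (fun d => (s, d))).foldl PySem.Set.add out)
        PySem.Set.empty := by
  obtain ⟨hknd, hgget⟩ : pvInv nn gsl (gsl.foldl (fun d g => pvS2 nn g (pvS1 g d)) PySem.Dict.empty) := by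
    have h := pvInv_fold nn gsl [] PySem.Dict.empty (pvInv_nil nn)
    simpa using h
  have hkeys : PySem.List.sorted (gsl.foldl (fun d g => pvS2 nn g (pvS1 g d)) PySem.Dict.empty).keys
      (fun s => s)
      = (PySem.List.pyRange 0 nn 1).filter (fun s => decide (pvT gsl s ≠ PySem.Set.ofList [s])) := by
    apply PySem.List.sorted_eq_of_perm_of_pairwise_lt
    · apply (List.perm_ext_iff_of_nodup
        (List.Nodup.filter _ (PySem.List.nodup_pyRange_one 0 nn)) hknd).mpr
      intro a
      have hga := hgget a
      constructor
      · intro ha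
        rw [List.mem_filter] at ha
        obtain ⟨har, hap⟩ := ha
        rw [PySem.List.mem_pyRange_one] at har
        have hcond : 0 ≤ a ∧ a < nn ∧ pvT gsl a ≠ PySem.Set.ofList [a] :=
          ⟨har.1, har.2, of_decide_eq_true hap⟩
        by_contra hk
        rw [← PySem.Dict.get?_eq_none_iff_not_mem_keys] at hk
        rw [hga, if_pos hcond] at hk
        exact Option.some_ne_none _ hk
      · intro ha
        have hnone : (gsl.foldl (fun d g => pvS2 nn g (pvS1 g d)) PySem.Dict.empty).get? a ≠ none := by
          intro hn
          rw [PySem.Dict.get?_eq_none_iff_not_mem_keys] at hn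
          exact hn ha
        rw [hga] at hnone
        by_cases hcond : 0 ≤ a ∧ a < nn ∧ pvT gsl a ≠ PySem.Set.ofList [a]
        · rw [List.mem_filter, PySem.List.mem_pyRange_one]
          exact ⟨⟨hcond.1, hcond.2.1⟩, decide_eq_true hcond.2.2⟩
        · rw [if_neg hcond] at hnone
          exact absurd rfl hnone
    · exact (PySem.List.pairwise_lt_pyRange_one 0 nn).filter _
  rw [hkeys]
  have hbody : ∀ x ∈ PySem.List.pyRange 0 nn 1,
      (fun s => decide (pvT gsl s ≠ PySem.Set.ofList [s])) x = false →
      ∀ acc : PySem.Set (Int × Int),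
        (fun reach src => (pvT gsl src).foldl
          (fun r dst => if dst ≠ src then PySem.Set.add r (src, dst) else r) reach) acc x = acc := by
    intro x _ hpx acc
    have hxx : pvT gsl x = PySem.Set.ofList [x] := not_not.mp (of_decide_eq_false hpx)
    simp only
    rw [hxx]
    show ([x] : List Int).foldl
        (fun r dst => if dst ≠ x then PySem.Set.add r (x, dst) else r) acc = acc
    simp
  rw [pv_foldl_skip _ _ _ _ hbody]
  apply PySem.List.foldl_congr_mem
  intro acc x hx
  rw [List.mem_filter] at hx
  obtain ⟨hxr, hxp⟩ := hx
  rw [PySem.List.mem_pyRange_one] at hxr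
  have hcond : 0 ≤ x ∧ x < nn ∧ pvT gsl x ≠ PySem.Set.ofList [x] :=
    ⟨hxr.1, hxr.2, of_decide_eq_true hxp⟩
  have hg1 : (gsl.foldl (fun d g => pvS2 nn g (pvS1 g d)) PySem.Dict.empty).getD x [] = pvT gsl x := by
    rw [PySem.Dict.getD_eq_get?_getD, hgget x, if_pos hcond]
    rfl
  rw [hg1]
  exact pv_emit_eq _ _ _

-- ===== VERDICT =====
theorem compute_reachable_pairs_spec : Claim_equal_compute_reachable_pairs := by
  intro se k _
  unfold Spec_compute_reachable_pairs
  have hg : ∀ t : Int,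
      (((PySem.List.sorted se (fun e => e.1)).foldl
          (fun d e => d.modify e.1 [] (fun l => l ++ [(e.2.1, k + e.2.2)]))
          PySem.Dict.empty).getD t [])
        = ((se.foldl
          (fun d e => d.modify e.1 [] (fun l => l ++ [(e.2.1, k + e.2.2)]))
          PySem.Dict.empty).getD t []) := by
    intro t
    rw [pv_groups_getD, pv_groups_getD, pv_sorted_filter_key]
  have ht : PySem.List.sorted ((PySem.List.sorted se (fun e => e.1)).foldl
          (fun d e => d.modify e.1 [] (fun l => l ++ [(e.2.1, k + e.2.2)]))
          PySem.Dict.empty).keys (fun t => t)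
        = PySem.List.sorted (se.foldl
          (fun d e => d.modify e.1 [] (fun l => l ++ [(e.2.1, k + e.2.2)]))
          PySem.Dict.empty).keys (fun t => t) := by
    rw [pv_groups_keys, pv_groups_keys, pv_times_eq]
  simp only [compute_reachable_pairs, compute_reachable_pairs_alt]
  rw [ht]
  have hsrc : ∀ src : Int,
      (PySem.List.sorted (se.foldl
          (fun d e => d.modify e.1 [] (fun l => l ++ [(e.2.1, k + e.2.2)]))
          PySem.Dict.empty).keys (fun t => t)).foldl (fun act t =>
        pvA_while (((PySem.List.sorted se (fun e => e.1)).foldl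
            (fun d e => d.modify e.1 [] (fun l => l ++ [(e.2.1, k + e.2.2)]))
            PySem.Dict.empty).getD t [])
          (2 * ((((PySem.List.sorted se (fun e => e.1)).foldl
            (fun d e => d.modify e.1 [] (fun l => l ++ [(e.2.1, k + e.2.2)]))
            PySem.Dict.empty).getD t []).length) + 1) act) (PySem.Set.ofList [src])
      = pvT ((PySem.List.sorted (se.foldl
          (fun d e => d.modify e.1 [] (fun l => l ++ [(e.2.1, k + e.2.2)]))
          PySem.Dict.empty).keys (fun t => t)).map (fun t => (se.foldl
            (fun d e => d.modify e.1 [] (fun l => l ++ [(e.2.1, k + e.2.2)]))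
            PySem.Dict.empty).getD t [])) src := by
    intro src
    rw [pvT, List.foldl_map]
    apply pv_foldl_ext
    intro act t
    rw [hg t, pvSat]
    exact pvLoop _ _ _ _ (pvDrop_refl _ _)
  have hA := pv_foldl_ext
      (fun reach src =>
        ((PySem.List.sorted (se.foldl
            (fun d e => d.modify e.1 [] (fun l => l ++ [(e.2.1, k + e.2.2)]))
            PySem.Dict.empty).keys (fun t => t)).foldl (fun act t =>
          pvA_while (((PySem.List.sorted se (fun e => e.1)).foldl
              (fun d e => d.modify e.1 [] (fun l => l ++ [(e.2.1, k + e.2.2)]))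
              PySem.Dict.empty).getD t [])
            (2 * ((((PySem.List.sorted se (fun e => e.1)).foldl
              (fun d e => d.modify e.1 [] (fun l => l ++ [(e.2.1, k + e.2.2)]))
              PySem.Dict.empty).getD t []).length) + 1) act) (PySem.Set.ofList [src])).foldl
          (fun r dst => if dst ≠ src then PySem.Set.add r (src, dst) else r) reach)
      (fun reach src =>
        (pvT ((PySem.List.sorted (se.foldl
            (fun d e => d.modify e.1 [] (fun l => l ++ [(e.2.1, k + e.2.2)]))
            PySem.Dict.empty).keys (fun t => t)).map (fun t => (se.foldl
              (fun d e => d.modify e.1 [] (fun l => l ++ [(e.2.1, k + e.2.2)]))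
              PySem.Dict.empty).getD t [])) src).foldl
          (fun r dst => if dst ≠ src then PySem.Set.add r (src, dst) else r) reach)
      (PySem.List.pyRange 0 (2 * k) 1) PySem.Set.empty
      (fun reach src => by dsimp only; rw [hsrc src])
  rw [hA, pv_bridge (2 * k)]
  have hBf : ((PySem.List.sorted (se.foldl
        (fun d e => d.modify e.1 [] (fun l => l ++ [(e.2.1, k + e.2.2)]))
        PySem.Dict.empty).keys (fun t => t)).map (fun t => (se.foldl
          (fun d e => d.modify e.1 [] (fun l => l ++ [(e.2.1, k + e.2.2)]))
          PySem.Dict.empty).getD t [])).foldl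
      (fun d g => pvS2 (2 * k) g (pvS1 g d)) PySem.Dict.empty
      = ((PySem.List.sorted (se.foldl
        (fun d e => d.modify e.1 [] (fun l => l ++ [(e.2.1, k + e.2.2)]))
        PySem.Dict.empty).keys (fun t => t)).map (fun t => ((se.foldl
          (fun d e => d.modify e.1 [] (fun l => l ++ [(e.2.1, k + e.2.2)]))
          PySem.Dict.empty).getD t [], pvNodes ((se.foldl
          (fun d e => d.modify e.1 [] (fun l => l ++ [(e.2.1, k + e.2.2)]))
          PySem.Dict.empty).getD t [])))).foldl
      (fun gr p =>
        (p.2).foldl (fun d x =>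
          if 0 ≤ x ∧ x < 2 * k ∧ d.contains x = false then
            let a := pvB_sat (2 * p.1.length + 1) p.1 (PySem.Set.ofList [x])
            if 1 < a.length then d.insert x a else d
          else d)
          (gr.items.foldl (fun d sa =>
            if PySem.Set.isdisjoint p.2 sa.2 = true then d
            else d.insert sa.1 (pvB_sat (2 * p.1.length + 1) p.1 sa.2)) gr))
      PySem.Dict.empty := by
    rw [List.foldl_map, List.foldl_map]
    rfl
  rw [hBf]
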